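-- pv_equiv track=rewrite | github.com/OpenNTI/nti.utils | src/nti/utils/cypher.py | blocks_2_numlist
-- ===== SOURCE A (Python) =====
-- import copy
--
-- def blocks_2_numlist(blocks, n):
-- 	"""
-- 	inverse function of numlist_2_blocks.
-- 	"""
-- 	return_list = []
-- 	to_process = copy.copy(blocks)
-- 	for num_block in to_process:
-- 		inner = []
-- 		for _ in range(0, n):
-- 			inner.append(num_block % 256)
-- 			num_block >>= 8
-- 		inner.reverse()
-- 		return_list.extend(inner)
-- 	return return_list
-- ===== SOURCE B (Python) =====
-- def blocks_2_numlist(blocks, n):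
--     if n <= 0:
--         return []
--     size = 1 << (8 * n)
--     return [byte for b in blocks for byte in (b % size).to_bytes(n, 'big')]
-- ===== Notes on version B (the rewrite author's own statement) =====
-- stated objective: idiomatic
-- what changed: Drops A's accumulator loops entirely: B is a single flat list comprehension that reduces each block mod 2^(8n) and converts it with int.to_bytes(n,'big'), instead of A's per-byte shift/append/reverse inner loop feeding an extend loop.
import Mathlib
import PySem

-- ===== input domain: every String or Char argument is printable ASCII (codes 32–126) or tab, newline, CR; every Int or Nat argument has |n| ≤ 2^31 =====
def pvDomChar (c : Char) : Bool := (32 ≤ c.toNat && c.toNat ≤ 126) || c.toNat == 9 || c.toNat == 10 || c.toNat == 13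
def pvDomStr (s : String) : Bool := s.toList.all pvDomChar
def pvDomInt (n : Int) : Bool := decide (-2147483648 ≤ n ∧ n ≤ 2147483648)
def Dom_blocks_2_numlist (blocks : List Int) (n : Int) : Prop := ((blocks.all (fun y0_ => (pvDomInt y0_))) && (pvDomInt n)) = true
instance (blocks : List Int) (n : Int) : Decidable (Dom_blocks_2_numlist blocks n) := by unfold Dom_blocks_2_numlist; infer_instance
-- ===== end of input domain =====

-- B drops A's accumulator loops: one flat list comprehension (flatMap) that reduces each
-- block mod 2^(8n) and converts it big-endian, instead of A's shift/append/reverse loops.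

-- ===== PORT A =====
-- inner loop: for _ in range(0, n): inner.append(num_block % 256); num_block >>= 8
def aInner : Nat → Int → List Int → List Int
  | 0, _, inner => inner
  | k+1, v, inner => aInner k (PySem.Int.floordiv v 256) (inner ++ [PySem.Int.mod v 256])

def blocks_2_numlist (blocks : List Int) (n : Int) : List Int :=
  blocks.foldl (fun return_list num_block =>
    return_list ++ (aInner n.toNat num_block []).reverse) []

-- ===== PORT B =====
-- (v).to_bytes(n, 'big') for 0 ≤ v < 2^(8n): big-endian list of n bytes
def toBytesBE : Nat → Int → List Int
  | 0, _ => []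
  | k+1, v => toBytesBE k (v / 256) ++ [v % 256]

def blocks_2_numlist_alt (blocks : List Int) (n : Int) : List Int :=
  if n ≤ 0 then []
  else blocks.flatMap (fun b => toBytesBE n.toNat (PySem.Int.mod b (2 ^ (8 * n.toNat))))

-- ===== PRECONDITION & SPEC =====
def Spec_blocks_2_numlist (blocks : List Int) (n : Int) (out : List Int) : Prop := out = blocks_2_numlist_alt blocks n
instance (blocks : List Int) (n : Int) (out : List Int) : Decidable (Spec_blocks_2_numlist blocks n out) := by unfold Spec_blocks_2_numlist; infer_instance

-- ===== CLAIM =====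
def Claim_equal_blocks_2_numlist : Prop := ∀ (blocks : List Int) (n : Int), Dom_blocks_2_numlist blocks n → Spec_blocks_2_numlist blocks n (blocks_2_numlist blocks n)

-- ===== LEMMAS AND PROOFS =====

theorem aInner_acc (k : Nat) (v : Int) (acc : List Int) :
    aInner k v acc = acc ++ aInner k v [] := by
  induction k generalizing v acc with
  | zero => simp [aInner]
  | succ k ih =>
    simp only [aInner]
    rw [ih (PySem.Int.floordiv v 256) (acc ++ [PySem.Int.mod v 256]),
        ih (PySem.Int.floordiv v 256) ([] ++ [PySem.Int.mod v 256])]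
    simp

-- the split v % (256*M) = 256*((v/256) % M) + v % 256 (euclidean)
theorem emod_mul_split (v M : Int) (hM : 0 < M) :
    v % (256 * M) = 256 * ((v / 256) % M) + v % 256 := by
  have h1 : v = 256 * M * ((v / 256) / M) + (256 * ((v / 256) % M) + v % 256) := by
    have a1 := Int.mul_ediv_add_emod v 256
    have a2 := Int.mul_ediv_add_emod (v / 256) M
    nlinarith [a1, a2]
  have hr1 : 0 ≤ v % 256 := Int.emod_nonneg v (by norm_num)
  have hr2 : v % 256 < 256 := Int.emod_lt_of_pos v (by norm_num)
  have hq1 : 0 ≤ (v / 256) % M := Int.emod_nonneg _ (by omega)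
  have hq2 : (v / 256) % M < M := Int.emod_lt_of_pos _ hM
  have hlt : 256 * ((v / 256) % M) + v % 256 < 256 * M := by nlinarith
  have hge : 0 ≤ 256 * ((v / 256) % M) + v % 256 := by nlinarith
  calc v % (256 * M)
      = (256 * M * ((v / 256) / M) + (256 * ((v / 256) % M) + v % 256)) % (256 * M) := by
        rw [← h1]
    _ = (256 * ((v / 256) % M) + v % 256) % (256 * M) := by
        rw [Int.add_comm, Int.add_mul_emod_self_left]
    _ = 256 * ((v / 256) % M) + v % 256 := Int.emod_eq_of_lt hge hlt

theorem key (k : Nat) (v : Int) :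
    (aInner k v []).reverse = toBytesBE k (v % (2 ^ (8 * k))) := by
  induction k generalizing v with
  | zero => simp [aInner, toBytesBE]
  | succ k ih =>
    have hM : (0 : Int) < 2 ^ (8 * k) := by positivity
    have hpow : (2 : Int) ^ (8 * (k + 1)) = 256 * 2 ^ (8 * k) := by ring
    have hsplit := emod_mul_split v (2 ^ (8 * k)) hM
    have hfd : PySem.Int.floordiv v 256 = v / 256 :=
      PySem.Int.floordiv_eq_ediv_of_pos (by norm_num)
    have hfm : PySem.Int.mod v 256 = v % 256 :=
      PySem.Int.mod_eq_emod_of_pos (by norm_num)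
    show (aInner k (PySem.Int.floordiv v 256) ([] ++ [PySem.Int.mod v 256])).reverse = _
    rw [aInner_acc, hfd, hfm]
    simp only [List.nil_append, List.reverse_append, List.reverse_cons, List.reverse_nil,
      List.nil_append, toBytesBE]
    rw [ih (v / 256), hpow, hsplit]
    have h256 : (256 : Int) ≠ 0 := by norm_num
    have hr1 : 0 ≤ v % 256 := Int.emod_nonneg v (by norm_num)
    have hr2 : v % 256 < 256 := Int.emod_lt_of_pos v (by norm_num)
    have hdiv : (256 * ((v / 256) % (2 ^ (8 * k))) + v % 256) / 256 = (v / 256) % (2 ^ (8 * k)) := by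
      rw [Int.add_comm, Int.add_mul_ediv_left _ _ h256, Int.ediv_eq_zero_of_lt hr1 hr2]
      ring
    have hmod : (256 * ((v / 256) % (2 ^ (8 * k))) + v % 256) % 256 = v % 256 := by
      rw [Int.add_comm, Int.add_mul_emod_self_left, Int.emod_eq_of_lt hr1 hr2]
    rw [hdiv, hmod]

-- ===== VERDICT =====
theorem blocks_2_numlist_spec : Claim_equal_blocks_2_numlist := by
  intro blocks n _
  unfold Spec_blocks_2_numlist blocks_2_numlist blocks_2_numlist_alt
  by_cases hn : n ≤ 0
  · have h0 : n.toNat = 0 := Int.toNat_of_nonpos hn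
    simp only [hn, if_pos, h0]
    have hf : (fun (return_list : List Int) (num_block : Int) =>
        return_list ++ (aInner 0 num_block []).reverse)
        = fun (return_list : List Int) (_ : Int) => return_list := by
      funext acc b; simp [aInner]
    rw [hf, List.foldl_fixed]
  · simp only [hn, if_false]
    have hf : (fun (return_list : List Int) (num_block : Int) =>
        return_list ++ (aInner n.toNat num_block []).reverse)
        = fun (acc : List Int) (b : Int) =>
            acc ++ toBytesBE n.toNat (PySem.Int.mod b (2 ^ (8 * n.toNat))) := by
      funext acc b
      rw [key, PySem.Int.mod_eq_emod_of_pos (by positivity)]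
    rw [hf, PySem.List.foldl_append_eq_flatMap]
    simp
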